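-- pv_equiv track=rewrite | github.com/Java-S12138/Music_Download | Music_Function.py | make_valid_name
-- ===== SOURCE A (Python) =====
-- def half2full(s):
--     ns = []
--     for c in s:
--         num = ord(c)
--         if num == 0x20:
--             num = 0x3000
--         elif 0x21 <= num <= 0x7e:
--             num += 0xfee0
--         ns.append(chr(num))
--     return ''.join(ns)
--
-- def make_valid_name(name):
--     bad_chars = r'/\:*?"<>|'
--     nl = list(name)
--     for i, c in enumerate(nl):
--         if c in bad_chars:
--             nl[i] = half2full(c)
--     name = ''.join(nl)
--     return name
-- ===== SOURCE B (Python) =====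
-- def make_valid_name(name):
--     for c in '/\\:*?"<>|':
--         name = name.replace(c, chr(ord(c) + 0xFEE0))
--     return name
-- ===== Notes on version B (the rewrite author's own statement) =====
-- stated objective: faster
-- what changed: Instead of one pass over the name with a per-character membership test, list mutation and the half2full helper, B loops over the nine bad characters and rewrites the whole string once per character with C-level str.replace (staged whole-string passes driven by the bad-character alphabet, no per-character Python bytecode).
import Mathlib
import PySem

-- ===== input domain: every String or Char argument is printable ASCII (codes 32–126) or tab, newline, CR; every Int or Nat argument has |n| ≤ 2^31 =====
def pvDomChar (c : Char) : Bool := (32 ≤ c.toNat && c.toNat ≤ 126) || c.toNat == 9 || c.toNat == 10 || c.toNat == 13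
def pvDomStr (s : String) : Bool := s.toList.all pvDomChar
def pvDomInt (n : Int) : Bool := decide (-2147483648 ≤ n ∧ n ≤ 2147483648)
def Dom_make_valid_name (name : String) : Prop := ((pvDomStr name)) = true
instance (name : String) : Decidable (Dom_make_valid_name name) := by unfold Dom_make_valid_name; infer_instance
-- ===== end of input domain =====

-- B replaces A's single pass over the name (per-character membership test, list mutation,
-- half2full helper) by a loop over the nine bad characters doing one whole-string
-- str.replace pass per character (simpler, staged-passes decomposition).


-- ===== PORT A =====
def half2full (s : String) : String :=
  let ns := s.toList.foldl (fun ns c =>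
    let num : Nat := c.toNat
    let num := if num = 0x20 then 0x3000
               else if 0x21 ≤ num ∧ num ≤ 0x7e then num + 0xfee0 else num
    ns ++ [Char.ofNat num]) []
  PySem.Str.join "" (ns.map (fun c => String.ofList [c]))

def make_valid_name (name : String) : String :=
  let badChars : String := "/\\:*?\"<>|"
  let nl : List String := name.toList.map (fun c => String.ofList [c])
  let nl := nl.map (fun c => if PySem.Str.isIn c badChars then half2full c else c)
  PySem.Str.join "" nl

-- ===== PORT B =====
-- for c in '/\\:*?"<>|': name = name.replace(c, chr(ord(c) + 0xFEE0))
def make_valid_name_alt (name : String) : String :=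
  ("/\\:*?\"<>|" : String).toList.foldl
    (fun s c => PySem.Str.replace s (String.ofList [c]) (String.ofList [Char.ofNat (c.toNat + 0xFEE0)]))
    name

-- ===== PRECONDITION & SPEC =====
def Spec_make_valid_name (name : String) (out : String) : Prop := out = make_valid_name_alt name
instance (name : String) (out : String) : Decidable (Spec_make_valid_name name out) := by unfold Spec_make_valid_name; infer_instance

-- ===== CLAIM (what is proved, stated in full; the proofs are below) =====
def Claim_equal_make_valid_name : Prop := ∀ (name : String), Dom_make_valid_name name → Spec_make_valid_name name (make_valid_name name)

-- ===== LEMMAS AND PROOFS =====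

-- single-character replacement on the char list is a pointwise map
theorem go_single (b fc : Char) (l : List Char) : ∀ (fuel : Nat) (acc : List Char), l.length ≤ fuel →
    PySem.Chars.replace.go [b] [fc] fuel l acc
      = acc.reverse ++ l.map (fun c => if c = b then fc else c) := by
  induction l with
  | nil =>
    intro fuel acc _
    cases fuel <;> simp [PySem.Chars.replace.go]
  | cons c t ih =>
    intro fuel acc hf
    cases fuel with
    | zero => simp at hf
    | succ fuel =>
      rw [PySem.Chars.replace.go]
      by_cases hc : b = c
      · subst hc
        have hpre : ([b] : List Char).isPrefixOf (b :: t) = true := by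
          simp [List.isPrefixOf]
        rw [if_pos hpre]
        have ht : t.length ≤ fuel := by simpa using hf
        simp only [List.length_cons, List.length_nil, List.drop_succ_cons, List.drop_zero,
          Nat.zero_add]
        rw [ih fuel _ ht]
        simp
      · have hpre : ([b] : List Char).isPrefixOf (c :: t) = false := by
          simp [List.isPrefixOf, hc]
        rw [if_neg (by simp [hpre])]
        have ht : t.length ≤ fuel := by simpa using hf
        rw [ih fuel _ ht]
        simp [Ne.symm hc]

theorem replace_single (b fc : Char) (l : List Char) :
    PySem.Chars.replace l [b] [fc] = l.map (fun c => if c = b then fc else c) := by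
  rw [PySem.Chars.replace]
  simp only [List.isEmpty_cons, Bool.false_eq_true, if_false]
  simpa using go_single b fc l l.length [] le_rfl

-- a fold of pointwise maps is a map of the pointwise fold
theorem foldl_map_comm (bs : List Char) (g : Char → Char → Char) :
    ∀ (l : List Char),
      bs.foldl (fun l b => l.map (g b)) l = l.map (fun c => bs.foldl (fun x b => g b x) c) := by
  induction bs with
  | nil => intro l; simp
  | cons b bs ih =>
    intro l
    simp only [List.foldl_cons, ih, List.map_map]
    rfl

-- the pointwise substitution B performs for each character
def substFold (c : Char) : Char :=
  ("/\\:*?\"<>|" : String).toList.foldl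
    (fun x b => if x = b then Char.ofNat (b.toNat + 0xFEE0) else x) c

-- per character, A's branch result equals the singleton of B's pointwise fold
theorem perChar (c : Char) :
    (if PySem.Str.isIn (String.ofList [c]) "/\\:*?\"<>|" then half2full (String.ofList [c]) else String.ofList [c])
      = String.ofList [substFold c] := by
  by_cases h1 : c = '/'; · subst h1; decide
  by_cases h2 : c = '\\'; · subst h2; decide
  by_cases h3 : c = ':'; · subst h3; decide
  by_cases h4 : c = '*'; · subst h4; decide
  by_cases h5 : c = '?'; · subst h5; decide
  by_cases h6 : c = '"'; · subst h6; decide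
  by_cases h7 : c = '<'; · subst h7; decide
  by_cases h8 : c = '>'; · subst h8; decide
  by_cases h9 : c = '|'; · subst h9; decide
  have hmem : c ∉ ("/\\:*?\"<>|" : String).toList := by
    intro hm
    have : c = '/' ∨ c = '\\' ∨ c = ':' ∨ c = '*' ∨ c = '?' ∨ c = '"' ∨ c = '<' ∨ c = '>' ∨ c = '|' := by
      simpa using hm
    tauto
  have hin : PySem.Str.isIn (String.ofList [c]) "/\\:*?\"<>|" = false := by
    rw [PySem.Str.isIn_eq]
    apply (PySem.Chars.isIn_eq_false_iff _ _).mpr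
    intro hinf
    simp only [String.toList_ofList] at hinf
    exact hmem (List.singleton_sublist.mp hinf.sublist)
  rw [hin]
  simp only [Bool.false_eq_true, if_false]
  have hfix : substFold c = c := by
    unfold substFold
    simp [List.foldl, h1, h2, h3, h4, h5, h6, h7, h8, h9]
  rw [hfix]

theorem join_singletons (cs : List Char) :
    PySem.Str.join "" (cs.map (fun c => String.ofList [c])) = String.ofList cs := by
  apply String.toList_inj.mp
  rw [PySem.Str.toList_join]
  simp only [List.map_map]
  have : ((fun s => String.toList s) ∘ fun c => String.ofList [c]) = fun c => [c] := by
    funext c; simp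
  rw [this]
  simp [PySem.Chars.join_nil_singletons]

-- B's staged string-level passes, read on the char list
theorem alt_toList (name : String) :
    (make_valid_name_alt name).toList = name.toList.map substFold := by
  unfold make_valid_name_alt
  have key : ∀ (bs : List Char) (s : String),
      (bs.foldl (fun s c => PySem.Str.replace s (String.ofList [c]) (String.ofList [Char.ofNat (c.toNat + 0xFEE0)])) s).toList
        = bs.foldl (fun l c => l.map (fun x => if x = c then Char.ofNat (c.toNat + 0xFEE0) else x)) s.toList := by
    intro bs
    induction bs with
    | nil => intro s; rfl
    | cons b bs ih =>
      intro s
      simp only [List.foldl_cons, ih]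
      congr 1
      rw [PySem.Str.toList_replace]
      simp only [String.toList_ofList]
      exact replace_single b _ s.toList
  rw [key]
  exact foldl_map_comm _ _ name.toList

theorem make_valid_name_eq (name : String) :
    make_valid_name name = make_valid_name_alt name := by
  have hB : make_valid_name_alt name = String.ofList (name.toList.map substFold) := by
    apply String.toList_inj.mp
    simp [alt_toList]
  unfold make_valid_name
  simp only [List.map_map, Function.comp_def, perChar]
  rw [hB]
  have h := join_singletons (name.toList.map substFold)
  rw [List.map_map] at h
  exact h

-- ===== VERDICT (by name: the statement is the Claim_ definition above) =====
theorem make_valid_name_spec : Claim_equal_make_valid_name := by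
  intro name _
  unfold Spec_make_valid_name
  exact make_valid_name_eq name
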